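-- pv_equiv track=rewrite | github.com/dnlyons/GOCompetition | MyPython1.py | remove_end_of_line_comment_from_row
-- ===== SOURCE A (Python) =====
-- def remove_end_of_line_comment_from_row(row, end_of_line_str):
--     index = [r.find(end_of_line_str) for r in row]
--     len_row = len(row)
--     entries_with_end_of_line_strs = [i for i in range(len_row) if index[i] > -1]
--     num_entries_with_end_of_line_strs = len(entries_with_end_of_line_strs)
--     if num_entries_with_end_of_line_strs > 0:
--         # last_entry_with_end_of_line_str = min(entries_with_end_of_line_strs)
--         # len_row_new = last_entry_with_end_of_line_str + 1
--         row_new = [r for r in row]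
--         # row_new = [row[i] for i in range(len_row_new)]
--         for i in entries_with_end_of_line_strs:
--             row_new[i] = remove_end_of_line_comment(row_new[i], end_of_line_str)
--         # row_new[len_row_new - 1] = remove_end_of_line_comment(row_new[len_row_new - 1], end_of_line_str)
--     else:
--         # row_new = [r for r in row]
--         row_new = row
--     return row_new
--
-- def remove_end_of_line_comment(token, end_of_line_str):
--     token_new = token
--     index = token_new.find(end_of_line_str)
--     if index > -1:
--         token_new = token_new[0:index]
--     return token_new
-- ===== SOURCE B (Python) =====
-- def remove_end_of_line_comment_from_row(row, end_of_line_str):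
--     out = []
--     changed = False
--     for r in row:
--         idx = r.find(end_of_line_str)
--         if idx > -1:
--             out.append(r[0:idx])
--             changed = True
--         else:
--             out.append(r)
--     return out if changed else row
-- ===== Notes on version B (the rewrite author's own statement) =====
-- stated objective: simpler
-- what changed: Replaced A's three passes (find-index list, filtered index list, in-place mutation loop over those indices) by one pass that builds the output list directly with a changed flag, returning the original list when nothing changed.
import Mathlib
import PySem

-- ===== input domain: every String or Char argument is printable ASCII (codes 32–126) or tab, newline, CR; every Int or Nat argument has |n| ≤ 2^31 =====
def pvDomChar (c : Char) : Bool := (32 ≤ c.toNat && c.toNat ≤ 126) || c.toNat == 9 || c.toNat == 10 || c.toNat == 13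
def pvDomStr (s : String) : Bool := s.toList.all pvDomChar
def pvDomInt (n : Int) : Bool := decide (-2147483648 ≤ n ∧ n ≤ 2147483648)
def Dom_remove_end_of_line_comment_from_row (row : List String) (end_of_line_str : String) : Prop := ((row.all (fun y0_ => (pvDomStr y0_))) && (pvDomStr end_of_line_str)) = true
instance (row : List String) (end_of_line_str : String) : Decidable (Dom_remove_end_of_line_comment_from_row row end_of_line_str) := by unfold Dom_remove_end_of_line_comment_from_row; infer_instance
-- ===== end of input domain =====

-- B replaces A's three passes (find-index list, filtered index list, mutation loop) by one
-- pass building the output with a changed flag; objective: simpler. Return values only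
-- (Python A returns the same list object when nothing changed, B does too).

-- ===== PORT A =====
-- helper: remove_end_of_line_comment(token, end_of_line_str)
def remove_end_of_line_comment (token : String) (end_of_line_str : String) : String :=
  let token_new := token
  let index := PySem.Str.find token_new end_of_line_str
  if index > -1 then PySem.Str.slice token_new (some 0) (some index) else token_new

def remove_end_of_line_comment_from_row (row : List String) (end_of_line_str : String) : List String :=
  let index := row.map (fun r => PySem.Str.find r end_of_line_str)
  let len_row : Int := (row.length : Int)
  let entries_with_end_of_line_strs :=
    -- index[i]: i always in range here, so pyGetD is exact (never the default)
    (PySem.List.pyRange 0 len_row 1).filter (fun i => PySem.List.pyGetD index i (-1) > -1)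
  let num_entries_with_end_of_line_strs := entries_with_end_of_line_strs.length
  if num_entries_with_end_of_line_strs > 0 then
    -- row_new = [r for r in row]; then for i in entries: row_new[i] = remove_end_of_line_comment(row_new[i], …)
    -- i comes from range(len_row) so 0 ≤ i < len: i.toNat is exact and pyGetD never defaults
    entries_with_end_of_line_strs.foldl
      (fun row_new i =>
        row_new.set i.toNat (remove_end_of_line_comment (PySem.List.pyGetD row_new i "") end_of_line_str))
      (row.map (fun r => r))
  else
    row

-- ===== PORT B =====
def remove_end_of_line_comment_from_row_alt (row : List String) (end_of_line_str : String) : List String :=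
  let res := row.foldl
    (fun st r =>
      let idx := PySem.Str.find r end_of_line_str
      if idx > -1 then (st.1 ++ [PySem.Str.slice r (some 0) (some idx)], true)
      else (st.1 ++ [r], st.2))
    ([], false)
  if res.2 then res.1 else row

-- ===== PRECONDITION & SPEC =====
def Spec_remove_end_of_line_comment_from_row (row : List String) (end_of_line_str : String) (out : List String) : Prop := out = remove_end_of_line_comment_from_row_alt row end_of_line_str
instance (row : List String) (end_of_line_str : String) (out : List String) : Decidable (Spec_remove_end_of_line_comment_from_row row end_of_line_str out) := by unfold Spec_remove_end_of_line_comment_from_row; infer_instance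

-- ===== CLAIM (what is proved, stated in full; the proofs are below) =====
def Claim_equal_remove_end_of_line_comment_from_row : Prop := ∀ (row : List String) (end_of_line_str : String), Dom_remove_end_of_line_comment_from_row row end_of_line_str → Spec_remove_end_of_line_comment_from_row row end_of_line_str (remove_end_of_line_comment_from_row row end_of_line_str)

-- ===== LEMMAS AND PROOFS =====

-- the per-token truncation both programs perform
def pvF (eol : String) (r : String) : String :=
  if PySem.Str.find r eol > -1 then PySem.Str.slice r (some 0) (some (PySem.Str.find r eol)) else r

theorem pvF_of_neg {eol r : String} (h : ¬ PySem.Str.find r eol > -1) : pvF eol r = r := by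
  unfold pvF; rw [if_neg h]

theorem rm_eq_pvF (r eol : String) : remove_end_of_line_comment r eol = pvF eol r := rfl

-- B's fold, fully characterised
theorem altB_fold (eol : String) : ∀ (xs : List String) (acc : List String) (c : Bool),
    xs.foldl (fun st r =>
      let idx := PySem.Str.find r eol
      if idx > -1 then (st.1 ++ [PySem.Str.slice r (some 0) (some idx)], true)
      else (st.1 ++ [r], st.2)) (acc, c)
    = (acc ++ xs.map (pvF eol), c || xs.any (fun r => decide (PySem.Str.find r eol > -1))) := by
  intro xs
  induction xs with
  | nil => intro acc c; simp
  | cons x xs ih =>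
    intro acc c
    rw [List.foldl_cons]
    have hinit : (let idx := PySem.Str.find x eol
        if idx > -1 then ((acc, c).1 ++ [PySem.Str.slice x (some 0) (some idx)], true)
        else ((acc, c).1 ++ [x], (acc, c).2))
        = if PySem.Str.find x eol > -1
          then (acc ++ [PySem.Str.slice x (some 0) (some (PySem.Str.find x eol))], true)
          else (acc ++ [x], c) := rfl
    rw [hinit]
    by_cases h : PySem.Str.find x eol > -1
    · rw [if_pos h, ih]
      have hp : pvF eol x = PySem.Str.slice x (some 0) (some (PySem.Str.find x eol)) := by
        unfold pvF; rw [if_pos h]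
      have h' : (-1 : Int) < PySem.Chars.find x.toList eol.toList := by simpa using h
      simp only [List.map_cons, List.any_cons]
      simp [hp]
      exact Or.inr (Or.inl h')
    · rw [if_neg h, ih]
      have h' : decide ((-1 : Int) < PySem.Chars.find x.toList eol.toList) = false := by
        simpa using h
      simp [pvF_of_neg h, h']

theorem map_pvF_of_none (eol : String) (xs : List String)
    (h : ∀ r ∈ xs, ¬ PySem.Str.find r eol > -1) : xs.map (pvF eol) = xs := by
  induction xs with
  | nil => rfl
  | cons x xs ih =>
    simp only [List.map_cons, pvF_of_neg (h x (by simp)), ih (fun r hr => h r (by simp [hr]))]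

theorem altB_eq_map (row : List String) (eol : String) :
    remove_end_of_line_comment_from_row_alt row eol = row.map (pvF eol) := by
  unfold remove_end_of_line_comment_from_row_alt
  rw [altB_fold]
  cases hc : row.any (fun r => decide (PySem.Str.find r eol > -1)) with
  | true => simp [hc]
  | false =>
    have h' : ∀ r ∈ row, ¬ PySem.Str.find r eol > -1 := by
      intro r hr
      have := List.any_eq_false.mp hc r hr
      simpa using this
    simp [hc, map_pvF_of_none eol row h']

-- A's mutation loop: setting distinct in-range positions k to g(current value at k)
theorem foldl_set_getElem? (g : String → String) :
    ∀ (ks : List Nat) (acc : List String), ks.Nodup → (∀ k ∈ ks, k < acc.length) →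
    ∀ j, (ks.foldl (fun rn k => rn.set k (g (rn.getD k ""))) acc)[j]? =
      if j ∈ ks then (acc[j]?).map g else acc[j]? := by
  intro ks
  induction ks with
  | nil => intro acc _ _ j; simp
  | cons k ks ih =>
    intro acc hnd hb j
    have hk : k < acc.length := hb k (by simp)
    have hknotin : k ∉ ks := (List.nodup_cons.mp hnd).1
    have hnd' : ks.Nodup := (List.nodup_cons.mp hnd).2
    have hb' : ∀ k' ∈ ks, k' < (acc.set k (g (acc.getD k ""))).length := by
      intro k' hk'; simpa using hb k' (by simp [hk'])
    rw [List.foldl_cons, ih _ hnd' hb' j]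
    by_cases hjk : j = k
    · subst hjk
      simp only [hknotin, List.mem_cons, true_or]
      rw [List.getElem?_set_self (by simpa using hk)]
      have h2 : acc.getD j "" = acc[j] := List.getD_eq_getElem acc "" hk
      simp [List.getElem?_eq_getElem hk, h2]
    · rw [List.getElem?_set_ne (by omega)]
      simp [List.mem_cons, hjk]

theorem foldl_set_eq_map (eol : String) (row : List String) (ks : List Nat)
    (hnd : ks.Nodup)
    (hmem : ∀ k, k ∈ ks → k < row.length)
    (hfix : ∀ j, j < row.length → j ∉ ks → pvF eol (row[j]!) = row[j]!) :
    ks.foldl (fun rn k => rn.set k (pvF eol (rn.getD k ""))) row = row.map (pvF eol) := by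
  apply List.ext_getElem?
  intro j
  rw [foldl_set_getElem? (pvF eol) ks row hnd hmem j]
  by_cases hj : j < row.length
  · have hget : row[j]? = some (row[j]) := List.getElem?_eq_getElem hj
    rw [List.getElem?_map, hget]
    by_cases hjin : j ∈ ks
    · rw [if_pos hjin]
    · rw [if_neg hjin]
      have := hfix j hj hjin
      simp only [List.getElem!_eq_getElem?_getD, hget, Option.getD_some] at this
      simp [this]
  · have hnone : row[j]? = none := List.getElem?_eq_none (by omega)
    simp [hnone, List.getElem?_map]

theorem portA_eq_map (row : List String) (eol : String) :
    remove_end_of_line_comment_from_row row eol = row.map (pvF eol) := by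
  unfold remove_end_of_line_comment_from_row
  simp only [List.map_id']
  have hrange : PySem.List.pyRange 0 (row.length : Int) 1
      = (List.range row.length).map (fun (k : Nat) => ((k : Int))) := by
    rw [PySem.List.pyRange_one]
    have h1 : ((row.length : Int) - 0).toNat = row.length := by omega
    rw [h1]
    exact List.map_congr_left (fun a _ => by omega)
  -- index[k] for k < len(row) is find(row[k], eol)
  have hidx : ∀ (k : Nat), k < row.length →
      PySem.List.pyGetD (row.map (fun r => PySem.Str.find r eol)) ((k : Int)) (-1)
        = PySem.Str.find (row[k]!) eol := by
    intro k hk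
    rw [PySem.List.pyGetD_natCast]
    rw [List.getD_eq_getElem _ _ (by simpa using hk)]
    simp [List.getElem!_eq_getElem?_getD, List.getElem?_eq_getElem hk]
  rw [hrange, List.filter_map, List.foldl_map]
  have hstep : ∀ (rn : List String) (k : Nat),
      rn.set ((k : Int)).toNat (remove_end_of_line_comment (PySem.List.pyGetD rn ((k : Int)) "") eol)
      = rn.set k (pvF eol (rn.getD k "")) := by
    intro rn k
    rw [PySem.List.pyGetD_natCast, rm_eq_pvF]
    simp
  simp only [hstep]
  -- the Nat index list and its two facts
  split_ifs with hlen
  · apply foldl_set_eq_map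
    · exact List.Nodup.filter _ List.nodup_range
    · intro k hk
      have := List.mem_range.mp (List.mem_of_mem_filter hk)
      exact this
    · intro j hj hjn
      apply pvF_of_neg
      intro hfind
      apply hjn
      refine List.mem_filter.mpr ⟨List.mem_range.mpr hj, ?_⟩
      simp only [Function.comp]
      have := hidx j hj
      simp only [this]
      simpa using hfind
  · -- no entry contains the separator: the map is the identity
    have hnil : (List.range row.length).filter
        ((fun i => decide (PySem.List.pyGetD (row.map (fun r => PySem.Str.find r eol)) i (-1) > -1))
          ∘ (fun (k : Nat) => ((k : Int)))) = [] := by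
      apply List.length_eq_zero_iff.mp
      rw [List.length_map] at hlen
      omega
    symm
    apply map_pvF_of_none
    intro r hr
    obtain ⟨k, hk, hrk⟩ := List.getElem_of_mem hr
    intro hfind
    have hkmem : k ∈ (List.range row.length).filter
        ((fun i => decide (PySem.List.pyGetD (row.map (fun r => PySem.Str.find r eol)) i (-1) > -1))
          ∘ (fun (k : Nat) => ((k : Int)))) := by
      refine List.mem_filter.mpr ⟨List.mem_range.mpr hk, ?_⟩
      simp only [Function.comp]
      rw [hidx k hk]
      have : row[k]! = r := by
        simp [List.getElem!_eq_getElem?_getD, List.getElem?_eq_getElem hk, hrk]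
      rw [this]
      simpa using hfind
    rw [hnil] at hkmem
    simp at hkmem

-- ===== VERDICT (by name: the statement is the Claim_ definition above) =====
theorem remove_end_of_line_comment_from_row_spec : Claim_equal_remove_end_of_line_comment_from_row := by
  intro row eol _
  unfold Spec_remove_end_of_line_comment_from_row
  rw [portA_eq_map, altB_eq_map]
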